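-- pv_equiv track=rewrite | github.com/Shurc1val/advent-of-code-2023 | day_12.py | possible_no_hash_options
-- ===== SOURCE A (Python) =====
-- def get_number_substring_arrangements(string_length: int, substring_lengths: list[int], cache_dict: dict = None):
--     """NOTE - substring lengths are ordered"""
--     if cache_dict is None:
--         cache_dict = {}
--     if sum(substring_lengths) > string_length:
--         return 0
--
--     if (sum(substring_lengths) == string_length) or (substring_lengths == []):
--         return 1
--
--     num_arrangements = 0
--     for i in range(0, string_length - substring_lengths[0] + 1):
--         num = cache_dict.get(f'{i} {str(substring_lengths[1:])}', None)
--         if num is None: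
--             num = get_number_substring_arrangements(i, substring_lengths[1:], cache_dict)
--             cache_dict[f'{i} {str(substring_lengths[1:])}'] = num
--         num_arrangements += num
--
--     return num_arrangements
--
-- def possible_no_hash_options(row: int, numbers_alt: list[int], cache_dict: dict = None):
--     if cache_dict is None:
--         cache_dict = {}
--
--     if sum(numbers_alt) > len(row):
--         return 0
--
--     if row.count('.') > 0:
--         num_correct_combos = 0
--         sub_row = len(row.split('.', 1)[0]) + 1
--         for i in range(0, len(numbers_alt) + 1):
--                 if sum(numbers_alt[:i]) <= sub_row and sum(numbers_alt[i:]) <= len(row) - sub_row: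
--                     rem_row = row.split('.', 1)[1]
--                     rem_nums = numbers_alt[i:]
--                     rem_options = cache_dict.get(f'{str(rem_row)} {str(rem_nums)}', None)
--                     if rem_options is None:
--                         rem_options = possible_no_hash_options(rem_row, rem_nums, cache_dict)
--
--                     num = get_number_substring_arrangements(sub_row, numbers_alt[:i])
--                     num_correct_combos += num * rem_options
--     else:
--         num_correct_combos = get_number_substring_arrangements(len(row), numbers_alt)
--
--     cache_dict[f'{str(row)} {str(numbers_alt)}'] = num_correct_combos
--     return num_correct_combos
-- ===== SOURCE B (Python) =====
-- def _prefix_sums(vals):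
--     out = []
--     t = 0
--     for v in vals:
--         t += v
--         out.append(t)
--     return out
--
--
-- def _count(length, chunk):
--     # iterative bottom-up DP over the suffixes of `chunk`, with prefix sums;
--     # exact for every integer entry (no recursion, no memo dict).
--     # sufs[m] = sum(chunk[m:]); ups[m] = largest cell index level m is asked for
--     # (-1 when level m is never reached, which caps the table widths).
--     k = len(chunk)
--     sufs = [0]
--     for a in reversed(chunk):
--         sufs.append(sufs[-1] + a)
--     sufs.reverse()
--     ups = [length]
--     for m in range(k):
--         ups.append(ups[-1] - chunk[m] if ups[-1] >= 0 and sufs[m] < ups[-1] else -1)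
--     vals = [1] * max(ups[k] + 1, 0)
--     for m in range(k - 1, -1, -1):
--         pref = _prefix_sums(vals)
--         a, suf, up = chunk[m], sufs[m], ups[m]
--         vals = [0 if suf > i else (1 if suf == i else (pref[i - a] if i - a >= 0 else 0))
--                 for i in range(max(up + 1, 0))]
--     return vals[length]
--
--
-- def possible_no_hash_options(row, numbers_alt, cache_dict=None):
--     if sum(numbers_alt) > len(row):   # the groups cannot fit at all
--         return 0
--     # Split once into '.'-free segments; segment capacities as A sees them:
--     # every segment but the last counts its trailing '.' as one extra cell.
--     parts = row.split('.')
--     lens = [len(p) + 1 for p in parts[:-1]] + [len(parts[-1])]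
--     n = len(numbers_alt)
--     # fwd[t] = ways to place the first t groups into the segments seen so far;
--     # infeasible cells are skipped (their contribution is 0).
--     rem = sum(lens)
--     fwd = [1] + [0] * n
--     for L in lens[:-1]:
--         rem -= L
--         new = [0] * (n + 1)
--         for j in range(n + 1):
--             if fwd[j]:
--                 for t in range(j, n + 1):
--                     if sum(numbers_alt[j:t]) <= L and sum(numbers_alt[t:]) <= rem:
--                         new[t] += fwd[j] * _count(L, numbers_alt[j:t])
--         fwd = new
--     # the last segment must take all remaining groups
--     total = 0
--     last = lens[-1]
--     for j in range(n + 1):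
--         if fwd[j] and sum(numbers_alt[j:]) <= last:
--             total += fwd[j] * _count(last, numbers_alt[j:])
--     return total
-- ===== Notes on version B (the rewrite author's own statement) =====
-- stated objective: alternative
-- what changed: Replaces A's memoized double recursion (recursive descent on the first '.' plus a per-segment recursive arrangement counter keyed by f-strings) with one split of the row, an iterative bottom-up prefix-sum table per '.'-free segment, and a forward table over the group list; no recursion, no memo dict.
-- outside the precondition, e.g. on possible_no_hash_options('.a', [1], {'a [1]': 99}): A returns 100, B returns 2
import Mathlib
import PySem

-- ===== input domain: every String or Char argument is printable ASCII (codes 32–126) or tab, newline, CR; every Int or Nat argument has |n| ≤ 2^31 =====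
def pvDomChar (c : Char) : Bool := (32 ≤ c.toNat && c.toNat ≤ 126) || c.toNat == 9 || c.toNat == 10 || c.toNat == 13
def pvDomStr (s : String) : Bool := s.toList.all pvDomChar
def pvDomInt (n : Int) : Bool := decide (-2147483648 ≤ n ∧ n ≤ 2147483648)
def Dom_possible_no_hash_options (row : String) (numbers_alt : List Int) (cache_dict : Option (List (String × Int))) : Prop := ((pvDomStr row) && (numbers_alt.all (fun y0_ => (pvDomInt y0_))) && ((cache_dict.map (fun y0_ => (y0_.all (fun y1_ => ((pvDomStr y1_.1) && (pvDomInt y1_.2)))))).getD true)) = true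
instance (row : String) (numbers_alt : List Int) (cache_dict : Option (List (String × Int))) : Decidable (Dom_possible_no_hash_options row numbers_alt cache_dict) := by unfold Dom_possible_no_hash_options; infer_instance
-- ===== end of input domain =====

-- B replaces A's memoized double recursion by one split of the row, an iterative
-- bottom-up prefix-sum table per '.'-free segment and a forward table over the
-- group list with the same feasibility guards (no recursion, no memo dict).
-- Python A mutates its cache_dict argument in place; the equivalence proved here is
-- about the RETURN value only (B performs no mutation).

-- ===== PORT A =====
-- port of get_number_substring_arrangements.  Its cache_dict parameter defaults to
-- None and each recursive level passes its own dict down, so the memo only ever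
-- stores values this very function just computed under a key determined by the
-- arguments; dropping the memo changes speed, never the returned value.
def gA (L : Int) (lens : List Int) : Int :=
  match lens with
  | [] => if (0 : Int) > L then 0 else 1      -- sum([]) = 0; then `sum == L or lens == []` is true
  | a :: rest =>
      if (a :: rest).sum > L then 0
      else if (a :: rest).sum = L then 1
      else
        -- for i in range(0, L - lens[0] + 1): num_arrangements += g(i, lens[1:])
        (PySem.List.pyRange 0 (L - a + 1) 1).foldl (fun acc i => acc + gA i rest) 0

-- port of possible_no_hash_options on the character list.  Under Pre_ the initial
-- cache has no key containing '[', while every lookup key f'{row} {numbers}' does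
-- contain '[' (from str(list)), so each `.get` misses and the recursive call below
-- is what the Python computes: the memo is dropped, the returned value is unchanged.
-- row.split('.', 1) is ported by hand (PySem's go-form is opaque to the proofs):
-- for the one-character separator, piece 0 is the prefix before the first '.' and
-- piece 1 the remainder after it — exact whenever '.' occurs (row.count('.') > 0).
-- The slice numbers_alt[:i] for 0 ≤ i is exactly `take i.toNat`, [i:] is `drop i.toNat`.
def fA (cs : List Char) (nums : List Int) : Int :=
  -- (sub_row and rem_row are written out where Python binds them to locals)
  if nums.sum > (cs.length : Int) then 0
  else if h : 0 < cs.count '.' then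
    (PySem.List.pyRange 0 ((nums.length : Int) + 1) 1).foldl
      (fun acc i =>
        if (nums.take i.toNat).sum ≤ ((cs.takeWhile (fun c => !(c == '.'))).length : Int) + 1 ∧
           (nums.drop i.toNat).sum ≤ (cs.length : Int) - (((cs.takeWhile (fun c => !(c == '.'))).length : Int) + 1) then
          acc + gA (((cs.takeWhile (fun c => !(c == '.'))).length : Int) + 1) (nums.take i.toNat)
              * fA (cs.drop ((cs.takeWhile (fun c => !(c == '.'))).length + 1)) (nums.drop i.toNat)
        else acc) 0
  else gA (cs.length : Int) nums
termination_by cs.length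
decreasing_by
  simp only [List.length_drop]
  have : cs ≠ [] := by
    intro hnil; rw [hnil] at h; simp at h
  have : 0 < cs.length := List.length_pos_iff.mpr this
  omega

def possible_no_hash_options (row : String) (numbers_alt : List Int) (cache_dict : Option (List (String × Int))) : Int :=
  -- `if cache_dict is None: cache_dict = {}`: under Pre_ the cache is inert either way
  fA row.toList numbers_alt

-- ===== PORT B =====
-- port of Source B's _prefix_sums: running-total loop appending partial sums
def prefSumsB (l : List Int) : List Int :=
  (l.foldl (fun (st : List Int × Int) v => (st.1 ++ [st.2 + v], st.2 + v)) ([], 0)).1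

-- port of Source B's sufs list in _count: sufs[m] = sum(chunk[m:])
def sufsB : List Int → List Int
  | [] => [0]
  | a :: t => (a + (sufsB t).headD 0) :: sufsB t

-- port of Source B's ups list in _count: ups[m] = largest cell index level m is asked
-- for, -1 when the level is never reached (the condition uses sufs[m] = (a::t).sum)
def upsB : Int → List Int → List Int
  | u, [] => [u]
  | u, a :: t => u :: upsB (if 0 ≤ u ∧ (a :: t).sum < u then u - a else -1) t

-- port of Source B's loop body in _count (one level of the bottom-up table);
-- tr = (chunk[m], sufs[m], ups[m])
def stepB (vals : List Int) (tr : Int × Int × Int) : List Int :=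
  let pref := prefSumsB vals
  (List.range (max (tr.2.2 + 1) 0).toNat).map (fun (i : Nat) =>
      if tr.2.1 > (i : Int) then 0
      else if tr.2.1 = (i : Int) then 1
      else if (0 : Int) ≤ (i : Int) - tr.1 then pref.getD ((i : Int) - tr.1).toNat 0 else 0)

-- port of Source B's _count: `for m in range(k-1, -1, -1)` over (chunk, sufs, ups)
-- = foldl over the reversed zip of the three lists
def countB (length : Int) (chunk : List Int) : Int :=
  ((chunk.zip ((sufsB chunk).zip (upsB length chunk))).reverse.foldl stepB
      ((List.range (max ((upsB length chunk).getLastD 0 + 1) 0).toNat).map (fun _ => (1 : Int)))).getD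
    length.toNat 0

-- hand port of row.split('.') (one-character separator: the pieces between the
-- occurrences of '.', empty pieces kept, exact for every string)
def splitDot : List Char → List (List Char)
  | [] => [[]]
  | c :: t =>
      if c = '.' then [] :: splitDot t
      else
        match splitDot t with
        | [] => [[c]]            -- unreachable: splitDot never returns []
        | p :: ps => (c :: p) :: ps

-- port of Source B's main loop body over lens[:-1]; st = (rem before this segment, fwd);
-- Source B's `new[t] += …` accumulation is ported cell-wise: new[t] is the sum over j of
-- its guarded increments
def stepFwd (nums : List Int) (st : Int × List Int) (L : Int) : Int × List Int :=
  (st.1 - L,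
   (List.range (nums.length + 1)).map (fun t =>
     ((List.range (nums.length + 1)).map (fun j =>
        if st.2.getD j 0 ≠ 0 ∧ j ≤ t ∧
           ((nums.drop j).take (t - j)).sum ≤ L ∧
           (nums.drop t).sum ≤ st.1 - L
        then st.2.getD j 0 * countB L ((nums.drop j).take (t - j)) else 0)).sum))

def possible_no_hash_options_alt (row : String) (numbers_alt : List Int) (cache_dict : Option (List (String × Int))) : Int :=
  if numbers_alt.sum > (row.toList.length : Int) then 0 else
  let parts := splitDot row.toList
  let lens : List Int := parts.dropLast.map (fun p => (p.length : Int) + 1) ++ [((parts.getLastD []).length : Int)]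
  -- fwd = [1] + [0]*n; for L in lens[:-1]: …
  let st := lens.dropLast.foldl (stepFwd numbers_alt)
    (lens.sum, 1 :: (List.range numbers_alt.length).map (fun _ => (0 : Int)))
  -- the last segment must take all remaining groups
  ((List.range (numbers_alt.length + 1)).map (fun j =>
      if st.2.getD j 0 ≠ 0 ∧ (numbers_alt.drop j).sum ≤ lens.getLastD 0
      then st.2.getD j 0 * countB (lens.getLastD 0) (numbers_alt.drop j) else 0)).sum

-- ===== PRECONDITION & SPEC =====
-- Pre_ excludes only prepopulated memo caches containing a key with a '[' character:
-- only such keys can collide with A's f-string lookup keys (which always contain a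
-- '[' from str(list)), so any other cache is inert, while a colliding one makes A
-- return whatever value was seeded into it — an unmatchable memo-poisoning corner.
def Pre_possible_no_hash_options (row : String) (numbers_alt : List Int) (cache_dict : Option (List (String × Int))) : Prop :=
  ∀ p ∈ cache_dict.getD [], '[' ∉ p.1.toList
instance (row : String) (numbers_alt : List Int) (cache_dict : Option (List (String × Int))) : Decidable (Pre_possible_no_hash_options row numbers_alt cache_dict) := by unfold Pre_possible_no_hash_options; infer_instance

def pvWitness_possible_no_hash_options : String × List Int × (Option (List (String × Int))) := ("#?.##", [1, 2], none)

def Spec_possible_no_hash_options (row : String) (numbers_alt : List Int) (cache_dict : Option (List (String × Int))) (out : Int) : Prop := out = possible_no_hash_options_alt row numbers_alt cache_dict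
instance (row : String) (numbers_alt : List Int) (cache_dict : Option (List (String × Int))) (out : Int) : Decidable (Spec_possible_no_hash_options row numbers_alt cache_dict out) := by unfold Spec_possible_no_hash_options; infer_instance

-- ===== CLAIM (what is proved, stated in full; the proofs are below) =====
def Claim_equal_possible_no_hash_options : Prop := ∀ (row : String) (numbers_alt : List Int) (cache_dict : Option (List (String × Int))), Dom_possible_no_hash_options row numbers_alt cache_dict → Pre_possible_no_hash_options row numbers_alt cache_dict → Spec_possible_no_hash_options row numbers_alt cache_dict (possible_no_hash_options row numbers_alt cache_dict)

-- ===== LEMMAS AND PROOFS =====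

-- the common mathematical skeleton: FL combines a list of segment capacities over a
-- list of group sizes, with gA (A's per-segment counter) as the per-segment weight
def FL : List Int → List Int → Int
  | [], ns => if ns.isEmpty then 1 else 0
  | L :: rest, ns =>
      ((List.range (ns.length + 1)).map (fun i => gA L (ns.take i) * FL rest (ns.drop i))).sum

-- gA vanishes when the groups cannot fit (any signs)
lemma gA_zero (L : Int) (c : List Int) (h : c.sum > L) : gA L c = 0 := by
  match c with
  | [] => simp only [List.sum_nil] at h; simp [gA, h]
  | a :: rest => rw [gA, if_pos h]

-- FL vanishes when the groups cannot fit
lemma FL_zero (lensL : List Int) : ∀ ns : List Int, lensL.sum < ns.sum → FL lensL ns = 0 := by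
  induction lensL with
  | nil =>
    intro ns h
    have : ns ≠ [] := by intro he; simp [he] at h
    simp [FL, this]
  | cons L rest ih =>
    intro ns h
    simp only [FL]
    apply List.sum_eq_zero
    intro x hx
    simp only [List.mem_map] at hx
    obtain ⟨i, _, rfl⟩ := hx
    by_cases hc : (ns.take i).sum > L
    · rw [gA_zero _ _ hc, zero_mul]
    · have hsplit : (ns.take i).sum + (ns.drop i).sum = ns.sum := List.sum_take_add_sum_drop ns i
      have : rest.sum < (ns.drop i).sum := by
        simp only [List.sum_cons] at h; omega
      rw [ih _ this, mul_zero]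

-- structure of splitDot
lemma splitDot_ne_nil (cs : List Char) : splitDot cs ≠ [] := by
  match cs with
  | [] => simp [splitDot]
  | c :: t =>
    simp only [splitDot]
    split
    · simp
    · split <;> simp

lemma splitDot_no_dot (cs : List Char) (h : '.' ∉ cs) : splitDot cs = [cs] := by
  induction cs with
  | nil => simp [splitDot]
  | cons c t ih =>
    have hc : c ≠ '.' := by intro he; exact h (by simp [he])
    have ht : '.' ∉ t := fun hm => h (by simp [hm])
    simp only [splitDot, if_neg hc, ih ht]

lemma splitDot_dot (cs : List Char) (h : '.' ∈ cs) :
    splitDot cs = (cs.takeWhile (fun c => !(c == '.'))) ::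
      splitDot (cs.drop ((cs.takeWhile (fun c => !(c == '.'))).length + 1)) := by
  induction cs with
  | nil => simp at h
  | cons c t ih =>
    by_cases hc : c = '.'
    · subst hc; simp [splitDot]
    · have ht : '.' ∈ t := by
        rcases List.mem_cons.mp h with he | hm
        · exact absurd he.symm hc
        · exact hm
      simp only [splitDot, if_neg hc, ih ht]
      have hcb : (!(c == '.')) = true := by simp [hc]
      simp [hcb]

-- the capacity list B builds from the split
def mkLens (ps : List (List Char)) : List Int :=
  ps.dropLast.map (fun p => (p.length : Int) + 1) ++ [((ps.getLastD []).length : Int)]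

lemma pre_lt (cs : List Char) (hd : '.' ∈ cs) :
    (cs.takeWhile (fun c => !(c == '.'))).length < cs.length := by
  have hsub : (cs.takeWhile (fun c => !(c == '.'))).Sublist cs := List.takeWhile_sublist _
  have hle := hsub.length_le
  rcases Nat.lt_or_ge (cs.takeWhile (fun c => !(c == '.'))).length cs.length with h1 | h1
  · exact h1
  · exfalso
    have he : cs.takeWhile (fun c => !(c == '.')) = cs := hsub.eq_of_length_le (by omega)
    have : '.' ∈ cs.takeWhile (fun c => !(c == '.')) := by rw [he]; exact hd
    have := List.mem_takeWhile_imp this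
    simp at this

lemma mkLens_cons (p : List Char) (ps : List (List Char)) (h : ps ≠ []) :
    mkLens (p :: ps) = ((p.length : Int) + 1) :: mkLens ps := by
  match ps with
  | q :: l =>
    simp only [mkLens, List.dropLast_cons₂, List.map_cons, List.cons_append, List.getLastD_cons]

lemma mkLens_sum_aux : ∀ (n : Nat) (cs : List Char), cs.length ≤ n →
    (mkLens (splitDot cs)).sum = (cs.length : Int) := by
  intro n
  induction n with
  | zero =>
    intro cs h
    have : cs = [] := List.length_eq_zero_iff.mp (Nat.le_zero.mp h)
    subst this; simp [splitDot, mkLens]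
  | succ n ih =>
    intro cs h
    by_cases hd : '.' ∈ cs
    · rw [splitDot_dot cs hd]
      have hprelt := pre_lt cs hd
      set pre := cs.takeWhile (fun c => !(c == '.')) with hpre
      set rem := cs.drop (pre.length + 1) with hrem
      have hremlen : rem.length = cs.length - (pre.length + 1) := by
        simp [hrem]
      rw [mkLens_cons _ _ (splitDot_ne_nil rem)]
      rw [List.sum_cons, ih rem (by omega)]
      have : (rem.length : Int) = (cs.length : Int) - ((pre.length : Int) + 1) := by
        rw [hremlen]; push_cast; omega
      rw [this]; ring
    · rw [splitDot_no_dot cs hd]; simp [mkLens]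

lemma mkLens_sum (cs : List Char) : (mkLens (splitDot cs)).sum = (cs.length : Int) := by
  exact mkLens_sum_aux cs.length cs le_rfl

-- A's recursion computes FL of the capacity list
lemma FL_single (L : Int) (ns : List Int) : FL [L] ns = gA L ns := by
  simp only [FL]
  rw [List.range_succ, List.map_append, List.sum_append]
  have h0 : ((List.range ns.length).map
      (fun i => gA L (ns.take i) * if (ns.drop i).isEmpty = true then 1 else 0)).sum = 0 := by
    apply List.sum_eq_zero
    intro x hx
    simp only [List.mem_map, List.mem_range] at hx
    obtain ⟨i, hi, rfl⟩ := hx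
    have : ns.drop i ≠ [] := by
      rw [ne_eq, List.drop_eq_nil_iff]; omega
    simp [this]
  rw [h0, zero_add]
  simp [List.take_length]

lemma foldl_ite_add {α : Type} (l : List α) (p : α → Prop) [DecidablePred p]
    (f : α → Int) (a : Int) :
    l.foldl (fun acc x => if p x then acc + f x else acc) a
      = a + (l.map (fun x => if p x then f x else 0)).sum := by
  have he : (fun (acc : Int) x => if p x then acc + f x else acc)
      = (fun acc x => acc + (if p x then f x else 0)) := by
    funext acc x; split <;> simp
  rw [he, PySem.List.foldl_add]

lemma fA_nodot (cs : List Char) (nums : List Int)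
    (hnd : '.' ∉ cs) : fA cs nums = FL (mkLens (splitDot cs)) nums := by
  rw [splitDot_no_dot cs hnd]
  have hm : mkLens [cs] = [(cs.length : Int)] := by simp [mkLens]
  rw [hm, FL_single]
  have hcount : ¬ 0 < cs.count '.' := by
    simp [List.count_eq_zero.mpr hnd]
  by_cases hg : nums.sum > (cs.length : Int)
  · rw [fA, if_pos hg, (gA_zero _ _ hg).symm]
  · rw [fA, if_neg hg, dif_neg hcount]

lemma fA_eq_aux : ∀ (n : Nat) (cs : List Char) (nums : List Int), cs.length ≤ n →
    fA cs nums = FL (mkLens (splitDot cs)) nums := by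
  intro n
  induction n with
  | zero =>
    intro cs nums h
    have : cs = [] := List.length_eq_zero_iff.mp (Nat.le_zero.mp h)
    subst this
    exact fA_nodot [] nums (by simp)
  | succ n ih =>
    intro cs nums h
    by_cases hd : '.' ∈ cs
    case neg => exact fA_nodot cs nums hd
    have hcount : 0 < cs.count '.' := List.count_pos_iff.mpr hd
    have hprelt := pre_lt cs hd
    set pre := cs.takeWhile (fun c => !(c == '.')) with hpre
    set rem := cs.drop (pre.length + 1) with hrem
    have hremlen : rem.length = cs.length - (pre.length + 1) := by simp [hrem]
    have hlens_sum : (((pre.length : Int) + 1) :: mkLens (splitDot rem)).sum = (cs.length : Int) := by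
      rw [List.sum_cons, mkLens_sum rem]
      rw [hremlen]
      push_cast
      omega
    rw [splitDot_dot cs hd, mkLens_cons _ _ (splitDot_ne_nil _), ← hpre, ← hrem]
    by_cases hg : nums.sum > (cs.length : Int)
    · rw [fA, if_pos hg]
      exact (FL_zero _ nums (by omega)).symm
    · rw [fA, if_neg hg, dif_pos hcount, ← hpre, ← hrem]
      rw [PySem.List.pyRange_one, sub_zero]
      have hM : ((nums.length : Int) + 1).toNat = nums.length + 1 := by omega
      rw [hM]
      rw [List.foldl_map, foldl_ite_add, zero_add]
      simp only [FL]
      refine congrArg List.sum (List.map_congr_left ?_)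
      intro k hk
      have hk' : k < nums.length + 1 := List.mem_range.mp hk
      have htoNat : ((0 : Int) + (k : Int)).toNat = k := by omega
      simp only [htoNat]
      have hfa := ih rem (nums.drop k) (by omega)
      rw [hfa]
      by_cases hc : (nums.take k).sum ≤ (pre.length : Int) + 1 ∧
          (nums.drop k).sum ≤ (cs.length : Int) - ((pre.length : Int) + 1)
      · rw [if_pos hc]
      · rw [if_neg hc]
        rcases not_and_or.mp hc with hc1 | hc2
        · rw [gA_zero _ _ (by omega), zero_mul]
        · have : (mkLens (splitDot rem)).sum < (nums.drop k).sum := by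
            rw [mkLens_sum rem]
            rw [hremlen] at *
            push_cast at *
            omega
          rw [FL_zero _ _ this, mul_zero]

lemma fA_eq (cs : List Char) (nums : List Int) :
    fA cs nums = FL (mkLens (splitDot cs)) nums := by
  exact fA_eq_aux cs.length cs nums le_rfl

-- B's prefix-sum loop computes the partial sums
lemma prefSumsB_aux (l : List Int) : ∀ (acc : List Int) (t : Int),
    l.foldl (fun (st : List Int × Int) v => (st.1 ++ [st.2 + v], st.2 + v)) (acc, t)
      = (acc ++ (List.range l.length).map (fun j => t + (l.take (j + 1)).sum), t + l.sum) := by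
  induction l with
  | nil => intro acc t; simp
  | cons v tail ih =>
    intro acc t
    simp only [List.foldl_cons]
    rw [ih (acc ++ [t + v]) (t + v)]
    refine congrArg₂ Prod.mk ?_ ?_
    · rw [List.append_assoc]
      congr 1
      rw [List.length_cons, List.range_succ_eq_map, List.map_cons, List.map_map,
        List.singleton_append]
      congr 1
      · simp
      · apply List.map_congr_left
        intro j _
        simp only [Function.comp_apply, List.take_succ_cons, List.sum_cons]
        ring
    · rw [List.sum_cons]; ring

lemma prefSumsB_eq (l : List Int) :
    prefSumsB l = (List.range l.length).map (fun j => (l.take (j + 1)).sum) := by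
  unfold prefSumsB
  rw [prefSumsB_aux l [] 0]
  simp

lemma prefSumsB_getD (l : List Int) (j : Nat) (hj : j < l.length) :
    (prefSumsB l).getD j 0 = (l.take (j + 1)).sum := by
  rw [prefSumsB_eq]
  exact PySem.List.getD_map_range _ _ _ _ hj


-- ((List.range n).map f).sum as a Finset sum (for the double-sum exchange below)
lemma rsum_eq (n : Nat) (f : Nat → Int) :
    ((List.range n).map f).sum = ∑ i ∈ Finset.range n, f i := by
  induction n with
  | zero => simp
  | succ n ih =>
    rw [List.range_succ, Finset.sum_range_succ, List.map_append, List.sum_append, ih]; simp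

lemma sufsB_headD (c : List Int) : (sufsB c).headD 0 = c.sum := by
  induction c with
  | nil => simp [sufsB]
  | cons a t ih =>
    show ((a + (sufsB t).headD 0) :: sufsB t).headD 0 = _
    rw [List.headD_cons, ih, List.sum_cons]

lemma upsB_ne_nil (u : Int) (c : List Int) : upsB u c ≠ [] := by
  cases c <;> simp [upsB]

lemma getLastD_irrel {α : Type} (l : List α) (h : l ≠ []) (d d' : α) :
    l.getLastD d = l.getLastD d' := by
  cases l with
  | nil => exact absurd rfl h
  | cons a t => rfl

-- the bottom-up fold maintains the table of gA values on every level it reaches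
lemma fold_inv : ∀ (c : List Int) (L : Int),
    (c.zip ((sufsB c).zip (upsB L c))).reverse.foldl stepB
        ((List.range (max ((upsB L c).getLastD 0 + 1) 0).toNat).map (fun _ => (1 : Int)))
      = (List.range (max (L + 1) 0).toNat).map (fun (i : Nat) => gA (i : Int) c) := by
  intro c
  induction c with
  | nil =>
    intro L
    simp only [List.zip_nil_left, List.reverse_nil, List.foldl_nil, upsB,
      List.getLastD_cons, List.getLastD_nil]
    apply List.map_congr_left
    intro i _
    have : ¬ ((0 : Int) > (i : Int)) := by omega
    simp [gA, this]
  | cons a c' ih =>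
    intro L
    have hsufs : sufsB (a :: c') = (a :: c').sum :: sufsB c' := by
      show (a + (sufsB c').headD 0) :: sufsB c' = _
      rw [sufsB_headD]
      simp [List.sum_cons]
    have hups : upsB L (a :: c')
        = L :: upsB (if 0 ≤ L ∧ (a :: c').sum < L then L - a else -1) c' := rfl
    set L' := if 0 ≤ L ∧ (a :: c').sum < L then L - a else -1 with hL'
    have hlast : (upsB L (a :: c')).getLastD 0 = (upsB L' c').getLastD 0 := by
      rw [hups, List.getLastD_cons, getLastD_irrel _ (upsB_ne_nil L' c') L 0]
    rw [hlast, hsufs, hups, List.zip_cons_cons, List.zip_cons_cons,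
      List.reverse_cons, List.foldl_append, ih L']
    simp only [List.foldl_cons, List.foldl_nil, stepB]
    apply List.map_congr_left
    intro i hi
    have hiL : (i : Int) ≤ L := by
      have h := List.mem_range.mp hi
      omega
    by_cases h1 : (a :: c').sum > (i : Int)
    · rw [if_pos h1, (gA_zero _ _ h1).symm]
    by_cases h2 : (a :: c').sum = (i : Int)
    · rw [if_neg h1, if_pos h2, gA, if_neg h1, if_pos h2]
    rw [if_neg h1, if_neg h2, gA, if_neg h1, if_neg h2]
    have hL'v : L' = L - a := by
      rw [hL', if_pos ⟨by omega, by omega⟩]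
    rw [hL'v]
    by_cases h3 : (0 : Int) ≤ (i : Int) - a
    · rw [if_pos h3]
      have hlen : ((List.range (max (L - a + 1) 0).toNat).map (fun (i : Nat) => gA (i : Int) c')).length
          = (max (L - a + 1) 0).toNat := by simp
      have hjlt : ((i : Int) - a).toNat
          < ((List.range (max (L - a + 1) 0).toNat).map (fun (i : Nat) => gA (i : Int) c')).length := by
        rw [hlen]; omega
      rw [prefSumsB_getD _ _ hjlt]
      rw [← List.map_take, List.take_range]
      have hmin : min (((i : Int) - a).toNat + 1) (max (L - a + 1) 0).toNat
          = ((i : Int) - a).toNat + 1 := by omega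
      rw [hmin]
      rw [PySem.List.pyRange_one, sub_zero, PySem.List.foldl_add, zero_add, List.map_map]
      have he : ((i : Int) - a + 1).toNat = ((i : Int) - a).toNat + 1 := by omega
      rw [he]
      refine congrArg List.sum (List.map_congr_left ?_)
      intro x _
      simp only [Function.comp_apply, zero_add]
    · rw [if_neg h3]
      have : (i : Int) - a + 1 ≤ 0 := by omega
      rw [PySem.List.pyRange_one, sub_zero]
      rw [Int.toNat_of_nonpos this]
      simp

lemma countB_eq (L : Int) (c : List Int) (hL : 0 ≤ L) : countB L c = gA L c := by
  unfold countB
  rw [fold_inv c L]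
  rw [PySem.List.getD_map_range _ _ _ _ (by omega)]
  rw [Int.toNat_of_nonneg hL]

-- the forward skeleton: FFr Sr p places p into the segments Sr.reverse (so the
-- head of Sr is the LAST segment)
def FFr : List Int → List Int → Int
  | [], p => if p.isEmpty then 1 else 0
  | L :: Sr, p =>
      ((List.range (p.length + 1)).map (fun t => FFr Sr (p.take t) * gA L (p.drop t))).sum

-- peeling the LAST segment off FL (triangular double-sum exchange)
lemma FL_append (S : List Int) (L : Int) : ∀ (ns : List Int),
    FL (S ++ [L]) ns
      = ((List.range (ns.length + 1)).map (fun t => FL S (ns.take t) * gA L (ns.drop t))).sum := by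
  induction S with
  | nil =>
    intro ns
    rw [List.nil_append, FL_single]
    by_cases hns : ns = []
    · subst hns; simp [FL]
    · rw [List.range_succ_eq_map, List.map_cons, List.map_map, List.sum_cons]
      have htail : ((List.range ns.length).map
          ((fun t => FL [] (ns.take t) * gA L (ns.drop t)) ∘ Nat.succ)).sum = 0 := by
        apply List.sum_eq_zero
        intro x hx
        obtain ⟨t, _, rfl⟩ := List.mem_map.mp hx
        have hne : ns.take (t + 1) ≠ [] := by
          rw [ne_eq, List.take_eq_nil_iff]
          push_neg
          exact ⟨by omega, hns⟩
        simp [Function.comp, FL, hne]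
      rw [htail, add_zero]
      simp [FL]
  | cons L0 S' ih =>
    intro ns
    calc FL ((L0 :: S') ++ [L]) ns
        = ((List.range (ns.length + 1)).map
            (fun i => gA L0 (ns.take i) * FL (S' ++ [L]) (ns.drop i))).sum := by
          rw [List.cons_append]; rfl
      _ = ∑ i ∈ Finset.range (ns.length + 1), ∑ t ∈ Finset.range (ns.length + 1 - i),
            gA L0 (ns.take i) * (FL S' ((ns.drop i).take t) * gA L ((ns.drop i).drop t)) := by
          rw [rsum_eq]
          apply Finset.sum_congr rfl
          intro i hi
          have hi' : i ≤ ns.length := by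
            have := Finset.mem_range.mp hi; omega
          rw [ih (ns.drop i), rsum_eq, Finset.mul_sum]
          have hlen : (ns.drop i).length + 1 = ns.length + 1 - i := by
            rw [List.length_drop]; omega
          rw [hlen]
      _ = ∑ i ∈ Finset.range (ns.length + 1), ∑ u ∈ Finset.Ico i (ns.length + 1),
            gA L0 (ns.take i) * (FL S' ((ns.drop i).take (u - i)) * gA L (ns.drop u)) := by
          apply Finset.sum_congr rfl
          intro i _
          rw [Finset.sum_Ico_eq_sum_range]
          apply Finset.sum_congr rfl
          intro t _
          rw [show i + t - i = t by omega, List.drop_drop]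
      _ = ∑ u ∈ Finset.range (ns.length + 1), ∑ i ∈ Finset.range (u + 1),
            gA L0 (ns.take i) * (FL S' ((ns.drop i).take (u - i)) * gA L (ns.drop u)) := by
          rw [Finset.range_eq_Ico, Finset.sum_Ico_Ico_comm]
      _ = ((List.range (ns.length + 1)).map
            (fun u => FL (L0 :: S') (ns.take u) * gA L (ns.drop u))).sum := by
          rw [rsum_eq]
          apply Finset.sum_congr rfl
          intro u hu
          have hu' : u ≤ ns.length := by
            have := Finset.mem_range.mp hu; omega
          have hFL : FL (L0 :: S') (ns.take u)
              = ((List.range ((ns.take u).length + 1)).map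
                  (fun i => gA L0 ((ns.take u).take i) * FL S' ((ns.take u).drop i))).sum := rfl
          rw [hFL, rsum_eq, Finset.sum_mul]
          have hlen : (ns.take u).length = u := by
            rw [List.length_take]; omega
          rw [hlen]
          apply Finset.sum_congr rfl
          intro i hi
          have hi' : i ≤ u := by
            have := Finset.mem_range.mp hi; omega
          rw [List.take_take, min_eq_left hi', List.drop_take]
          ring

-- FFr on the reversed segment list is FL
lemma FFr_rev : ∀ (Sr : List Int) (p : List Int), FFr Sr p = FL Sr.reverse p := by
  intro Sr
  induction Sr with
  | nil => intro p; rfl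
  | cons L Sr' ih =>
    intro p
    show ((List.range (p.length + 1)).map (fun t => FFr Sr' (p.take t) * gA L (p.drop t))).sum = _
    rw [List.reverse_cons, FL_append]
    apply congrArg List.sum
    apply List.map_congr_left
    intro t _
    rw [ih]

-- the forward table B maintains: cell t holds FFr R (nums.take t) when the rest of
-- the groups still fits into the remaining capacity r, and 0 otherwise
def mkFwd (nums : List Int) (R : List Int) (r : Int) : List Int :=
  (List.range (nums.length + 1)).map (fun t =>
    if (nums.drop t).sum ≤ r then FFr R (nums.take t) else 0)

lemma mkFwd_getD (nums R : List Int) (r : Int) (j : Nat) (hj : j < nums.length + 1) :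
    (mkFwd nums R r).getD j 0
      = if (nums.drop j).sum ≤ r then FFr R (nums.take j) else 0 := by
  unfold mkFwd
  rw [PySem.List.getD_map_range _ _ _ _ hj]

-- one cell of one forward step equals the FFr recursion (guards only skip zeros)
lemma step_cell (nums R : List Int) (L rem' : Int) (hL : 0 ≤ L) (t : Nat)
    (ht : t ≤ nums.length) (hguard : (nums.drop t).sum ≤ rem') :
    ((List.range (nums.length + 1)).map (fun j =>
       if (mkFwd nums R (L + rem')).getD j 0 ≠ 0 ∧ j ≤ t ∧
          ((nums.drop j).take (t - j)).sum ≤ L ∧ (nums.drop t).sum ≤ rem'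
       then (mkFwd nums R (L + rem')).getD j 0 * countB L ((nums.drop j).take (t - j)) else 0)).sum
      = FFr (L :: R) (nums.take t) := by
  have hFFr : FFr (L :: R) (nums.take t)
      = ((List.range (t + 1)).map
          (fun j => FFr R (nums.take j) * gA L ((nums.drop j).take (t - j)))).sum := by
    show ((List.range ((nums.take t).length + 1)).map
        (fun j => FFr R ((nums.take t).take j) * gA L ((nums.take t).drop j))).sum = _
    rw [show (nums.take t).length = t from by rw [List.length_take]; omega]
    apply congrArg List.sum
    apply List.map_congr_left
    intro j hj
    have hj' : j ≤ t := by
      have := List.mem_range.mp hj; omega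
    rw [List.take_take, min_eq_left hj', List.drop_take]
  rw [hFFr]
  -- split the j-range: terms with j > t are zero
  rw [show nums.length + 1 = (t + 1) + (nums.length - t) from by omega, List.range_add,
    List.map_append, List.map_map, List.sum_append]
  have hzero : ((List.range (nums.length - t)).map ((fun j =>
      if (mkFwd nums R (L + rem')).getD j 0 ≠ 0 ∧ j ≤ t ∧
         ((nums.drop j).take (t - j)).sum ≤ L ∧ (nums.drop t).sum ≤ rem'
      then (mkFwd nums R (L + rem')).getD j 0 * countB L ((nums.drop j).take (t - j)) else 0)
        ∘ (fun x => t + 1 + x))).sum = 0 := by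
    apply List.sum_eq_zero
    intro x hx
    obtain ⟨j, _, rfl⟩ := List.mem_map.mp hx
    have : ¬ (t + 1 + j ≤ t) := by omega
    simp only [Function.comp_apply]
    rw [if_neg (by tauto)]
  rw [hzero, add_zero]
  apply congrArg List.sum
  apply List.map_congr_left
  intro j hj
  have hj' : j ≤ t := by
    have := List.mem_range.mp hj; omega
  have hjn : j < nums.length + 1 := by omega
  rw [mkFwd_getD _ _ _ _ hjn]
  -- the chunk and the tail partition nums.drop j
  have hsplit : ((nums.drop j).take (t - j)).sum + (nums.drop t).sum = (nums.drop j).sum := by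
    have : ((nums.drop j).drop (t - j)) = nums.drop t := by
      rw [List.drop_drop, show j + (t - j) = t from by omega]
    rw [← this]
    exact List.sum_take_add_sum_drop _ _
  by_cases hcj : (nums.drop j).sum ≤ L + rem'
  · rw [if_pos hcj]
    by_cases hv : FFr R (nums.take j) = 0
    · rw [hv]
      rw [if_neg (by simp)]
      rw [zero_mul]
    · by_cases hch : ((nums.drop j).take (t - j)).sum ≤ L
      · rw [if_pos ⟨hv, hj', hch, hguard⟩, countB_eq _ _ hL]
      · rw [if_neg (by tauto), gA_zero _ _ (by omega), mul_zero]
  · rw [if_neg hcj]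
    rw [if_neg (by simp)]
    -- the term on the right is zero too: the chunk alone already overflows L
    have hch : ¬ ((nums.drop j).take (t - j)).sum ≤ L := by omega
    rw [gA_zero _ _ (by omega), mul_zero]

-- the main loop invariant over the non-last segments
lemma loop_inv (nums : List Int) (lastL : Int) : ∀ (S R : List Int),
    (∀ L ∈ S, 0 ≤ L) →
    S.foldl (stepFwd nums) (S.sum + lastL, mkFwd nums R (S.sum + lastL))
      = (lastL, mkFwd nums (S.reverse ++ R) lastL) := by
  intro S
  induction S with
  | nil => intro R _; simp
  | cons L S' ih =>
    intro R hnn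
    have hL : 0 ≤ L := hnn L List.mem_cons_self
    rw [List.foldl_cons]
    have hrem : (L :: S').sum + lastL - L = S'.sum + lastL := by
      simp only [List.sum_cons]; ring
    have hstep : stepFwd nums ((L :: S').sum + lastL, mkFwd nums R ((L :: S').sum + lastL)) L
        = (S'.sum + lastL, mkFwd nums (L :: R) (S'.sum + lastL)) := by
      simp only [stepFwd]
      rw [hrem]
      refine congrArg₂ Prod.mk rfl ?_
      have hmk : mkFwd nums (L :: R) (S'.sum + lastL)
          = (List.range (nums.length + 1)).map (fun t =>
              if (nums.drop t).sum ≤ S'.sum + lastL then FFr (L :: R) (nums.take t) else 0) := rfl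
      rw [hmk]
      apply List.map_congr_left
      intro t htm
      have ht : t ≤ nums.length := by
        have := List.mem_range.mp htm; omega
      have hcap : (L :: S').sum + lastL = L + (S'.sum + lastL) := by
        simp only [List.sum_cons]; ring
      rw [hcap]
      by_cases hg : (nums.drop t).sum ≤ S'.sum + lastL
      · rw [if_pos hg]
        exact step_cell nums R L (S'.sum + lastL) hL t ht hg
      · rw [if_neg hg]
        apply List.sum_eq_zero
        intro x hx
        obtain ⟨j, _, rfl⟩ := List.mem_map.mp hx
        rw [if_neg (by tauto)]
    rw [hstep, ih (L :: R) (fun x hx => hnn x (List.mem_cons_of_mem _ hx))]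
    rw [List.reverse_cons, List.append_assoc, List.singleton_append]

-- the final segment: all remaining groups go into it
lemma final_cell (nums R : List Int) (lastL : Int) (hL : 0 ≤ lastL) :
    ((List.range (nums.length + 1)).map (fun j =>
       if (mkFwd nums R lastL).getD j 0 ≠ 0 ∧ (nums.drop j).sum ≤ lastL
       then (mkFwd nums R lastL).getD j 0 * countB lastL (nums.drop j) else 0)).sum
      = FFr (lastL :: R) nums := by
  show _ = ((List.range (nums.length + 1)).map
      (fun j => FFr R (nums.take j) * gA lastL (nums.drop j))).sum
  apply congrArg List.sum
  apply List.map_congr_left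
  intro j hj
  have hjn : j < nums.length + 1 := List.mem_range.mp hj
  rw [mkFwd_getD _ _ _ _ hjn]
  by_cases hc : (nums.drop j).sum ≤ lastL
  · rw [if_pos hc]
    by_cases hv : FFr R (nums.take j) = 0
    · rw [hv, if_neg (by simp), zero_mul]
    · rw [if_pos ⟨hv, hc⟩, countB_eq _ _ hL]
  · rw [if_neg hc, if_neg (by tauto), gA_zero _ _ (by omega), mul_zero]

lemma altB_eq (row : String) (nums : List Int) (cache : Option (List (String × Int))) :
    possible_no_hash_options_alt row nums cache = FL (mkLens (splitDot row.toList)) nums := by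
  by_cases hg : nums.sum > (row.toList.length : Int)
  · show (if nums.sum > (row.toList.length : Int) then (0 : Int) else _) = _
    rw [if_pos hg, FL_zero _ nums (by rw [mkLens_sum]; omega)]
  show (if nums.sum > (row.toList.length : Int) then (0 : Int) else _) = _
  rw [if_neg hg]
  set ps := splitDot row.toList with hps
  set initL : List Int := ps.dropLast.map (fun p => (p.length : Int) + 1) with hinit
  set lastL : Int := ((ps.getLastD []).length : Int) with hlastL
  have hlens : mkLens ps = initL ++ [lastL] := rfl
  have hdropLast : (initL ++ [lastL]).dropLast = initL := List.dropLast_concat ..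
  have hgetLast : (initL ++ [lastL]).getLastD 0 = lastL := by
    rw [List.getLastD_concat]
  have hsum : (initL ++ [lastL]).sum = initL.sum + lastL := by
    rw [List.sum_append, List.sum_cons, List.sum_nil, add_zero]
  have hfwd0 : (1 :: (List.range nums.length).map (fun _ => (0 : Int)))
      = mkFwd nums [] ((initL ++ [lastL]).sum) := by
    unfold mkFwd
    rw [List.range_succ_eq_map, List.map_cons]
    congr 1
    · rw [List.drop_zero, List.take_zero]
      have hcap : nums.sum ≤ (initL ++ [lastL]).sum := by
        have := mkLens_sum row.toList
        rw [← hps, hlens] at this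
        omega
      rw [if_pos hcap]
      rfl
    · rw [List.map_map]
      apply List.map_congr_left
      intro t htm
      have ht : t < nums.length := List.mem_range.mp htm
      have hne : nums.take (t + 1) ≠ [] := by
        rw [ne_eq, List.take_eq_nil_iff]
        push_neg
        exact ⟨by omega, by intro h; rw [h] at ht; simp at ht⟩
      simp only [Function.comp_apply]
      have : FFr [] (nums.take (t + 1)) = 0 := by
        simp [FFr, hne]
      rw [this, ite_self]
  show ((List.range (nums.length + 1)).map (fun j =>
      if (((initL ++ [lastL]).dropLast).foldl (stepFwd nums)
            ((initL ++ [lastL]).sum, 1 :: (List.range nums.length).map (fun _ => (0 : Int)))).2.getD j 0 ≠ 0 ∧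
         (nums.drop j).sum ≤ (initL ++ [lastL]).getLastD 0
      then (((initL ++ [lastL]).dropLast).foldl (stepFwd nums)
            ((initL ++ [lastL]).sum, 1 :: (List.range nums.length).map (fun _ => (0 : Int)))).2.getD j 0
           * countB ((initL ++ [lastL]).getLastD 0) (nums.drop j)
      else 0)).sum = FL (mkLens ps) nums
  rw [hdropLast, hgetLast, hfwd0, hsum,
    loop_inv nums lastL initL [] (by
      intro L hL
      rw [hinit] at hL
      obtain ⟨p, _, rfl⟩ := List.mem_map.mp hL
      positivity)]
  rw [show ((lastL, mkFwd nums (initL.reverse ++ []) lastL) : Int × List Int).2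
      = mkFwd nums (initL.reverse ++ []) lastL from rfl]
  rw [List.append_nil, final_cell nums initL.reverse lastL (by rw [hlastL]; positivity)]
  rw [FFr_rev, List.reverse_cons, List.reverse_reverse, ← hlens]

-- ===== VERDICT (by name: the statement is the Claim_ definition above) =====
theorem possible_no_hash_options_spec : Claim_equal_possible_no_hash_options := by
  intro row nums cache _hdom _hpre
  show possible_no_hash_options row nums cache = possible_no_hash_options_alt row nums cache
  rw [show possible_no_hash_options row nums cache = fA row.toList nums from rfl,
      altB_eq row nums cache, fA_eq]
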